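-- pv_equiv track=rewrite | github.com/gsrr/leetcode | leetcode/893. Groups of Special-Equivalent Strings.py | is_same
-- ===== SOURCE A (Python) =====
-- import collections
--
-- def is_same(arr1, arr2):
--     dic11 = collections.defaultdict(int)
--     dic12 = collections.defaultdict(int)
--     dic21 = collections.defaultdict(int)
--     dic22 = collections.defaultdict(int)
--     i = 0
--     while i < len(arr1):
--         dic11[arr1[i]] += 1
--         i += 2
--     i = 0
--     while i < len(arr2):
--         dic21[arr2[i]] += 1
--         i += 2
--     if dic11 != dic21:
--         return False
--
--     i = 1
--     while i < len(arr1):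
--         dic12[arr1[i]] += 1
--         i += 2
--     i = 1
--     while i < len(arr2):
--         dic22[arr2[i]] += 1
--         i += 2
--     if dic12 != dic22:
--         return False
--     return True
-- ===== SOURCE B (Python) =====
-- def is_same(arr1, arr2):
--     return sorted(arr1[::2]) == sorted(arr2[::2]) and sorted(arr1[1::2]) == sorted(arr2[1::2])
-- ===== Notes on version B (the rewrite author's own statement) =====
-- stated objective: simpler
-- what changed: Replaces the four defaultdict frequency tables and index-stepping while loops with direct slice-and-sort comparisons of the even- and odd-index characters.
import Mathlib
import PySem

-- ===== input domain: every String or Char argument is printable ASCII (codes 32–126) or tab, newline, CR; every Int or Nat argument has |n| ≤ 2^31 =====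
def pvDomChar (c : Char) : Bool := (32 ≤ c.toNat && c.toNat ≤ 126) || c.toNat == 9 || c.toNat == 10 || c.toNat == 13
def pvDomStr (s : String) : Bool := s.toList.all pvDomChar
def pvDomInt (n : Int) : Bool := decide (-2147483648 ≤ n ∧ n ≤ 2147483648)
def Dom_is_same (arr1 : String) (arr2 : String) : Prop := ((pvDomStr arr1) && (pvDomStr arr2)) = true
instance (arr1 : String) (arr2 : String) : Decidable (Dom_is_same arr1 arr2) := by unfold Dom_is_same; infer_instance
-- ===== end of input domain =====

-- B replaces A's four defaultdict frequency tables (built by index-stepping while loops)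
-- with one-line slice-and-sort comparisons of the even- and odd-index characters (simpler).


-- ===== PORT A =====
-- Python's `dic11 != dic21` compares dicts ignoring insertion order: every key of
-- either dict must look up to the same value in both (this helper is that equality).
def pyDictEq (d1 d2 : PySem.Dict Char Int) : Bool :=
  (d1.keys.all (fun k => d1.get? k == d2.get? k)) &&
  (d2.keys.all (fun k => d1.get? k == d2.get? k))

-- the `i = start; while i < len(arr): d[arr[i]] += 1; i += 2` loop of A
-- (arr[i] is always in range here, so pyGetD's default ' ' is never read)
def countLoop (l : List Char) (start : Int) : PySem.Dict Char Int :=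
  (PySem.List.pyRange start l.length 2).foldl
    (fun d i => d.modify (PySem.List.pyGetD l i ' ') 0 (· + 1)) PySem.Dict.empty

def is_same (arr1 : String) (arr2 : String) : Bool :=
  let dic11 := countLoop arr1.toList 0
  let dic21 := countLoop arr2.toList 0
  if !(pyDictEq dic11 dic21) then false
  else
    let dic12 := countLoop arr1.toList 1
    let dic22 := countLoop arr2.toList 1
    if !(pyDictEq dic12 dic22) then false
    else true

-- ===== PORT B =====
def is_same_alt (arr1 : String) (arr2 : String) : Bool :=
  let e1 := (PySem.List.slice? arr1.toList none none 2).getD []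
  let e2 := (PySem.List.slice? arr2.toList none none 2).getD []
  let o1 := (PySem.List.slice? arr1.toList (some 1) none 2).getD []
  let o2 := (PySem.List.slice? arr2.toList (some 1) none 2).getD []
  (PySem.List.sorted e1 (fun x => x) == PySem.List.sorted e2 (fun x => x)) &&
  (PySem.List.sorted o1 (fun x => x) == PySem.List.sorted o2 (fun x => x))

-- ===== PRECONDITION & SPEC =====
def Spec_is_same (arr1 : String) (arr2 : String) (out : Bool) : Prop := out = is_same_alt arr1 arr2
instance (arr1 : String) (arr2 : String) (out : Bool) : Decidable (Spec_is_same arr1 arr2 out) := by unfold Spec_is_same; infer_instance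

-- ===== CLAIM (what is proved, stated in full; the proofs are below) =====
def Claim_equal_is_same : Prop := ∀ (arr1 : String) (arr2 : String), Dom_is_same arr1 arr2 → Spec_is_same arr1 arr2 (is_same arr1 arr2)

-- ===== LEMMAS AND PROOFS =====

-- a counter's get?: some count on members, none elsewhere
theorem get?_counter_eq (L : List Char) (c : Char) :
    (PySem.Dict.counter L).get? c = if c ∈ L then some ((L.count c : Int)) else none := by
  by_cases h : c ∈ L
  · simp only [h, if_pos]
    have hc : (PySem.Dict.counter L).contains c = true := by
      rw [PySem.Dict.contains_counter]; simpa using h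
    rw [PySem.Dict.contains_eq_isSome_get?] at hc
    obtain ⟨v, hv⟩ := Option.isSome_iff_exists.mp hc
    have hd := PySem.Dict.getD_counter L c
    rw [PySem.Dict.getD_eq_get?_getD, hv] at hd
    simp at hd
    rw [hv, hd]
  · simp only [h, if_neg, not_false_iff]
    rw [PySem.Dict.get?_eq_none_iff_contains, PySem.Dict.contains_counter]
    simpa using h

-- Python dict equality of two counters IS permutation of the counted lists
theorem pyDictEq_counter (L1 L2 : List Char) :
    pyDictEq (PySem.Dict.counter L1) (PySem.Dict.counter L2) = decide (L1.Perm L2) := by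
  have key : (pyDictEq (PySem.Dict.counter L1) (PySem.Dict.counter L2) = true) ↔ L1.Perm L2 := by
    simp only [pyDictEq, Bool.and_eq_true, List.all_eq_true, PySem.Dict.keys_counter,
      PySem.Set.mem_ofList, get?_counter_eq, beq_iff_eq]
    constructor
    · rintro ⟨h1, h2⟩
      rw [List.perm_iff_count]
      intro c
      by_cases hc1 : c ∈ L1
      · have := h1 c hc1
        by_cases hc2 : c ∈ L2 <;> simp [hc1, hc2] at this ⊢ <;> omega
      · by_cases hc2 : c ∈ L2
        · have := h2 c hc2
          simp [hc1, hc2] at this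
        · simp [List.count_eq_zero.mpr hc1, List.count_eq_zero.mpr hc2]
    · intro hp
      have hcnt := List.perm_iff_count.mp hp
      have hmem : ∀ c, c ∈ L1 ↔ c ∈ L2 := fun c => hp.mem_iff
      refine ⟨fun c hc => ?_, fun c hc => ?_⟩
      · simp [hc, (hmem c).mp hc, hcnt c]
      · simp [hc, (hmem c).mpr hc, hcnt c]
  by_cases hp : L1.Perm L2
  · simp [key.mpr hp, hp]
  · simp only [decide_eq_false hp]
    by_contra hne
    exact hp (key.mp (by
      revert hne
      cases pyDictEq (PySem.Dict.counter L1) (PySem.Dict.counter L2) <;> simp))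

-- the while-loop dict is the counter of the characters it visits
theorem countLoop_eq_counter (l : List Char) (a : Int) :
    countLoop l a = PySem.Dict.counter ((PySem.List.pyRange a l.length 2).map
      (fun i => PySem.List.pyGetD l i ' ')) := by
  rw [countLoop, PySem.Dict.counter_eq_foldl, List.foldl_map]

-- filterMap of in-range lookups is a map of pyGetD
theorem filterMap_range_eq_map (l : List Char) (f : Nat → Int) (cnt : Nat)
    (h : ∀ k : Nat, k < cnt → 0 ≤ f k ∧ f k < l.length) :
    (List.range cnt).filterMap (fun (k : Nat) => l[(f k).toNat]?) =
      (List.range cnt).map (fun (k : Nat) => PySem.List.pyGetD l (f k) ' ') := by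
  induction cnt with
  | zero => simp
  | succ n ih =>
    rw [List.range_succ, List.filterMap_append, List.map_append,
        ih (fun k hk => h k (by omega))]
    obtain ⟨h0, hlt⟩ := h n (by omega)
    have hnat : (f n).toNat < l.length := by omega
    simp [List.getElem?_eq_getElem hnat,
      PySem.List.pyGetD_eq_getElem l ' ' h0 (by exact_mod_cast hlt)]

-- the even slice is exactly the even while-loop's character sequence
theorem slice_even (l : List Char) :
    (PySem.List.slice? l none none 2).getD [] =
      (PySem.List.pyRange 0 l.length 2).map (fun i => PySem.List.pyGetD l i ' ') := by
  rw [PySem.List.pyRange_of_pos 0 l.length (by norm_num), List.map_map]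
  simp only [PySem.List.slice?, PySem.List.sliceIndices]
  norm_num
  rw [filterMap_range_eq_map l (fun x => 2 * (x : Int)) _ ?_]
  · simp [Function.comp_def]
  · intro k hk
    split at hk <;> simp only [] <;> omega

-- the odd slice is exactly the odd while-loop's character sequence
theorem slice_odd (l : List Char) :
    (PySem.List.slice? l (some 1) none 2).getD [] =
      (PySem.List.pyRange 1 l.length 2).map (fun i => PySem.List.pyGetD l i ' ') := by
  rw [PySem.List.pyRange_of_pos 1 l.length (by norm_num), List.map_map]
  simp only [PySem.List.slice?, PySem.List.sliceIndices]
  norm_num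
  rcases l with _ | ⟨c, t⟩
  · decide
  · have hmin : min (1:Int) (((c::t).length : Nat) : Int) = 1 := by simp
    rw [hmin, filterMap_range_eq_map (c::t) (fun x => 1 + 2 * (x : Int)) _ ?_]
    · simp [Function.comp_def]
    · intro k hk
      split at hk <;> simp only [] <;> omega

-- equality of the two sorted lists is a decide of permutation
theorem sorted_beq_eq_decide (xs ys : List Char) :
    (PySem.List.sorted xs (fun x => x) == PySem.List.sorted ys (fun x => x)) = decide (xs.Perm ys) := by
  rw [Bool.beq_eq_decide_eq, decide_eq_decide]
  exact PySem.List.sorted_id_eq_sorted_id_iff_perm xs ys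

-- ===== VERDICT (by name: the statement is the Claim_ definition above) =====
theorem is_same_spec : Claim_equal_is_same := by
  intro arr1 arr2 _
  unfold Spec_is_same is_same is_same_alt
  simp only [countLoop_eq_counter, pyDictEq_counter, slice_even, slice_odd, sorted_beq_eq_decide]
  by_cases h1 : ((PySem.List.pyRange 0 arr1.toList.length 2).map (fun i => PySem.List.pyGetD arr1.toList i ' ')).Perm
      ((PySem.List.pyRange 0 arr2.toList.length 2).map (fun i => PySem.List.pyGetD arr2.toList i ' ')) <;>
    by_cases h2 : ((PySem.List.pyRange 1 arr1.toList.length 2).map (fun i => PySem.List.pyGetD arr1.toList i ' ')).Perm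
      ((PySem.List.pyRange 1 arr2.toList.length 2).map (fun i => PySem.List.pyGetD arr2.toList i ' ')) <;>
    simp [h1, h2]
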